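-- pv_equiv track=rewrite | github.com/schiob/TestingSistemas | ago-dic-2021/Amaya Lopez Edson Gerardo/Parcial1/taquitos.py | taquitos_sabrositos
-- ===== SOURCE A (Python) =====
-- def taquitos_sabrositos(tacos):
--     cachete=0
--     lengua=0
--     tripitas=0
--     pastor=0
--     machito=0
--     total=0
--
--     for taquito in tacos:
--         if(taquito == 'cachete' ):
--             cachete +=1
--         elif(taquito  =="lengua"):
--             lengua+=1
--         elif(taquito  =="tripitas"):
--             tripitas+=1
--         elif(taquito =="pastor"):
--             pastor+=1
--         elif(taquito =="machito"):
--             machito+=1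
--
--     total = (cachete*13)+(lengua*10)+(tripitas*9)+(pastor*15)+(machito*14)
--
--     return total
-- ===== SOURCE B (Python) =====
-- def taquitos_sabrositos(tacos):
--     menu = (("cachete", 13), ("lengua", 10), ("tripitas", 9), ("pastor", 15), ("machito", 14))
--     return sum(price * tacos.count(name) for name, price in menu)
-- ===== Notes on version B (the rewrite author's own statement) =====
-- stated objective: simpler
-- what changed: Instead of one pass maintaining five counters and a final combining formula, B iterates over a fixed menu of (name, price) pairs and makes one list.count pass per menu entry, summing price * count; a one-line sum over staged counting passes.
import Mathlib
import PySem

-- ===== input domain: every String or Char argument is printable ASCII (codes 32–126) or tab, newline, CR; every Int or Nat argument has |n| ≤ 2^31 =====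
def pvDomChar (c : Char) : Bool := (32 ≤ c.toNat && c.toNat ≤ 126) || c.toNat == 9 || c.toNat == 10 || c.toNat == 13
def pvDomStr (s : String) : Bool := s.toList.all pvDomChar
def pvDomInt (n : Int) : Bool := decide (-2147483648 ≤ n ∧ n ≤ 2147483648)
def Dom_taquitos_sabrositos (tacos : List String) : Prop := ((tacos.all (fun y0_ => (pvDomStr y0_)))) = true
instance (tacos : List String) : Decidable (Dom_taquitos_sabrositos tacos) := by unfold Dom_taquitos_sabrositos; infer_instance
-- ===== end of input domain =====

-- B replaces A's single pass with five counters by one counting pass per menu entry,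
-- summing price * count over a fixed (name, price) menu (objective: simpler).

-- ===== PORT A =====
-- state: (cachete, lengua, tripitas, pastor, machito)
def taquitos_sabrositos (tacos : List String) : Int :=
  let s := tacos.foldl
    (fun (st : Int × Int × Int × Int × Int) taquito =>
      let (cachete, lengua, tripitas, pastor, machito) := st
      if taquito == "cachete" then (cachete + 1, lengua, tripitas, pastor, machito)
      else if taquito == "lengua" then (cachete, lengua + 1, tripitas, pastor, machito)
      else if taquito == "tripitas" then (cachete, lengua, tripitas + 1, pastor, machito)
      else if taquito == "pastor" then (cachete, lengua, tripitas, pastor + 1, machito)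
      else if taquito == "machito" then (cachete, lengua, tripitas, pastor, machito + 1)
      else (cachete, lengua, tripitas, pastor, machito))
    (0, 0, 0, 0, 0)
  (s.1 * 13) + (s.2.1 * 10) + (s.2.2.1 * 9) + (s.2.2.2.1 * 15) + (s.2.2.2.2 * 14)

-- ===== PORT B =====
def pvMenu : List (String × Int) :=
  [("cachete", 13), ("lengua", 10), ("tripitas", 9), ("pastor", 15), ("machito", 14)]

def taquitos_sabrositos_alt (tacos : List String) : Int :=
  (pvMenu.map (fun np => np.2 * (PySem.List.count tacos np.1 : Int))).sum

-- ===== PRECONDITION & SPEC =====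
def Spec_taquitos_sabrositos (tacos : List String) (out : Int) : Prop := out = taquitos_sabrositos_alt tacos
instance (tacos : List String) (out : Int) : Decidable (Spec_taquitos_sabrositos tacos out) := by unfold Spec_taquitos_sabrositos; infer_instance

-- ===== CLAIM (what is proved, stated in full; the proofs are below) =====
def Claim_equal_taquitos_sabrositos : Prop := ∀ (tacos : List String), Dom_taquitos_sabrositos tacos → Spec_taquitos_sabrositos tacos (taquitos_sabrositos tacos)

-- ===== LEMMAS AND PROOFS =====

-- A's foldl adds, componentwise, the number of occurrences of each name to the initial counters
theorem taquitos_fold_eq_counts (tacos : List String) (c l t p m : Int) :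
    tacos.foldl
      (fun (st : Int × Int × Int × Int × Int) taquito =>
        let (cachete, lengua, tripitas, pastor, machito) := st
        if taquito == "cachete" then (cachete + 1, lengua, tripitas, pastor, machito)
        else if taquito == "lengua" then (cachete, lengua + 1, tripitas, pastor, machito)
        else if taquito == "tripitas" then (cachete, lengua, tripitas + 1, pastor, machito)
        else if taquito == "pastor" then (cachete, lengua, tripitas, pastor + 1, machito)
        else if taquito == "machito" then (cachete, lengua, tripitas, pastor, machito + 1)
        else (cachete, lengua, tripitas, pastor, machito))
      (c, l, t, p, m) =
    (c + PySem.List.count tacos "cachete", l + PySem.List.count tacos "lengua",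
     t + PySem.List.count tacos "tripitas", p + PySem.List.count tacos "pastor",
     m + PySem.List.count tacos "machito") := by
  induction tacos generalizing c l t p m with
  | nil => simp [PySem.List.count_eq]
  | cons x xs ih =>
    simp only [List.foldl_cons]
    split_ifs with h1 h2 h3 h4 h5
    · have hx : x = "cachete" := by simpa using h1
      subst hx
      rw [ih]
      simp only [PySem.List.count_eq, List.count_cons, Prod.mk.injEq]
      refine ⟨?_, ?_, ?_, ?_, ?_⟩ <;> · push_cast; simp; try omega
    · have hx : x = "lengua" := by simpa using h2
      subst hx
      rw [ih]
      simp only [PySem.List.count_eq, List.count_cons, Prod.mk.injEq]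
      refine ⟨?_, ?_, ?_, ?_, ?_⟩ <;> · push_cast; simp; try omega
    · have hx : x = "tripitas" := by simpa using h3
      subst hx
      rw [ih]
      simp only [PySem.List.count_eq, List.count_cons, Prod.mk.injEq]
      refine ⟨?_, ?_, ?_, ?_, ?_⟩ <;> · push_cast; simp; try omega
    · have hx : x = "pastor" := by simpa using h4
      subst hx
      rw [ih]
      simp only [PySem.List.count_eq, List.count_cons, Prod.mk.injEq]
      refine ⟨?_, ?_, ?_, ?_, ?_⟩ <;> · push_cast; simp; try omega
    · have hx : x = "machito" := by simpa using h5
      subst hx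
      rw [ih]
      simp only [PySem.List.count_eq, List.count_cons, Prod.mk.injEq]
      refine ⟨?_, ?_, ?_, ?_, ?_⟩ <;> · push_cast; simp; try omega
    · simp only [beq_iff_eq] at h1 h2 h3 h4 h5
      rw [ih]
      simp only [PySem.List.count_eq, List.count_cons, Prod.mk.injEq]
      refine ⟨?_, ?_, ?_, ?_, ?_⟩
      · push_cast; simp [beq_iff_eq, h1]
      · push_cast; simp [beq_iff_eq, h2]
      · push_cast; simp [beq_iff_eq, h3]
      · push_cast; simp [beq_iff_eq, h4]
      · push_cast; simp [beq_iff_eq, h5]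

-- ===== VERDICT (by name: the statement is the Claim_ definition above) =====
theorem taquitos_sabrositos_spec : Claim_equal_taquitos_sabrositos := by
  intro tacos _
  unfold Spec_taquitos_sabrositos taquitos_sabrositos taquitos_sabrositos_alt
  rw [taquitos_fold_eq_counts]
  simp [pvMenu]
  ring
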